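-- pv_equiv track=rewrite | github.com/keerthu2908-hash/plant-disease-ai | image_predictor.py | label_matches_dataset
-- ===== SOURCE A (Python) =====
-- def label_matches_dataset(normalized_label: str, dataset_records: list) -> bool:
--     if not dataset_records:
--         return False
--
--     label_tokens = set(normalized_label.lower().split())
--     stop_words = {"the", "a", "an", "of", "in", "on", "and", "or", "is", "to", "for", "with"}
--     label_tokens -= stop_words
--
--     if not label_tokens:
--         return False
--
--     for record in dataset_records:
--         for field in ["name", "scientific_name", "cause_description"]:
--             field_val = str(record.get(field, "")).lower()
--             field_tokens = set(field_val.split()) - stop_words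
--             if label_tokens & field_tokens:
--                 return True
--
--     return False
-- ===== SOURCE B (Python) =====
-- def label_matches_dataset(normalized_label: str, dataset_records: list) -> bool:
--     if not dataset_records:
--         return False
--
--     stop_words = {"the", "a", "an", "of", "in", "on", "and", "or", "is", "to", "for", "with"}
--     words = [w for w in normalized_label.lower().split() if w not in stop_words]
--
--     if not words:
--         return False
--
--     field_words = [
--         w
--         for record in dataset_records
--         for field in ("name", "scientific_name", "cause_description")
--         for w in str(record.get(field, "")).lower().split()
--     ]
--     return any(w in field_words for w in words)
-- ===== Notes on version B (the rewrite author's own statement) =====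
-- stated objective: simpler
-- what changed: B drops all set machinery: it keeps the non-stopword label words as a plain list, flattens every field of every record into one combined word list, and answers with a single any(w in field_words) membership pass, instead of A's per-record per-field set construction, stop-word subtraction and intersection with early return.
import Mathlib
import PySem

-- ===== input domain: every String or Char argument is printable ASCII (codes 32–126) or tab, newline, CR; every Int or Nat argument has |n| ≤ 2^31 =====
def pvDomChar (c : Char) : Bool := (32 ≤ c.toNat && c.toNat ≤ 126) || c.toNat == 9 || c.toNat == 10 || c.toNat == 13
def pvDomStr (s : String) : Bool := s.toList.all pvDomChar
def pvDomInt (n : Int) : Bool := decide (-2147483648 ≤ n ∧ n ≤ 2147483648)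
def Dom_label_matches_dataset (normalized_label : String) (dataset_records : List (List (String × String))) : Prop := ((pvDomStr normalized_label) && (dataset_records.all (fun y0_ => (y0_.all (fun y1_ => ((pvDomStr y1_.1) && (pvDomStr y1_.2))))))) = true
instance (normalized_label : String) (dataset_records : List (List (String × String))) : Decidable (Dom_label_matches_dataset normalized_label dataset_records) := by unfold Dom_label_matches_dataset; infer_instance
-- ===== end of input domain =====

-- B drops A's set machinery entirely: it keeps the non-stopword label words as a plain filtered
-- list, flattens all fields of all records into one combined word list, and answers with a single
-- membership pass; objective: simpler.

-- ===== PORT A =====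
def pvStop : PySem.Set String :=
  PySem.Set.ofList ["the", "a", "an", "of", "in", "on", "and", "or", "is", "to", "for", "with"]

def pvTokens (record : List (String × String)) (field : String) : List String :=
  PySem.Str.split₀ (PySem.Str.lower (PySem.Dict.getD (PySem.Dict.mk record) field ""))

def label_matches_dataset (normalized_label : String) (dataset_records : List (List (String × String))) : Bool :=
  if dataset_records.isEmpty then false
  else
    let label_tokens : PySem.Set String :=
      PySem.Set.diff (PySem.Set.ofList (PySem.Str.split₀ (PySem.Str.lower normalized_label))) pvStop
    if label_tokens.isEmpty then false
    else
      dataset_records.any (fun record =>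
        ["name", "scientific_name", "cause_description"].any (fun field =>
          let field_tokens : PySem.Set String :=
            PySem.Set.diff (PySem.Set.ofList (pvTokens record field)) pvStop
          !(PySem.Set.inter label_tokens field_tokens).isEmpty))

-- ===== PORT B =====
def altStopWords : List String :=
  ["the", "a", "an", "of", "in", "on", "and", "or", "is", "to", "for", "with"]

def altFieldWords (dataset_records : List (List (String × String))) : List String :=
  dataset_records.flatMap (fun record =>
    ["name", "scientific_name", "cause_description"].flatMap (fun field =>
      PySem.Str.split₀ (PySem.Str.lower (PySem.Dict.getD (PySem.Dict.mk record) field ""))))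

def label_matches_dataset_alt (normalized_label : String) (dataset_records : List (List (String × String))) : Bool :=
  match dataset_records with
  | [] => false
  | _ =>
    let words : List String :=
      (PySem.Str.split₀ (PySem.Str.lower normalized_label)).filter
        (fun w => !altStopWords.contains w)
    match words with
    | [] => false
    | _ => words.any (fun w => (altFieldWords dataset_records).contains w)

-- ===== PRECONDITION & SPEC =====
def Spec_label_matches_dataset (normalized_label : String) (dataset_records : List (List (String × String))) (out : Bool) : Prop := out = label_matches_dataset_alt normalized_label dataset_records
instance (normalized_label : String) (dataset_records : List (List (String × String))) (out : Bool) : Decidable (Spec_label_matches_dataset normalized_label dataset_records out) := by unfold Spec_label_matches_dataset; infer_instance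

-- ===== CLAIM =====
def Claim_equal_label_matches_dataset : Prop := ∀ (normalized_label : String) (dataset_records : List (List (String × String))), Dom_label_matches_dataset normalized_label dataset_records → Spec_label_matches_dataset normalized_label dataset_records (label_matches_dataset normalized_label dataset_records)

-- ===== LEMMAS AND PROOFS =====
theorem mem_pvStop_iff (x : String) : x ∈ pvStop ↔ x ∈ altStopWords := by
  simp [pvStop, altStopWords, PySem.Set.mem_ofList]

theorem guard_eq (toks : List String) :
    (PySem.Set.diff (PySem.Set.ofList toks) pvStop).isEmpty
      = (toks.filter (fun w => !altStopWords.contains w)).isEmpty := by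
  rw [Bool.eq_iff_iff]
  simp only [List.isEmpty_iff, List.eq_nil_iff_forall_not_mem, List.mem_filter,
    PySem.Set.mem_diff, PySem.Set.mem_ofList, mem_pvStop_iff, Bool.not_eq_eq_eq_not,
    Bool.not_true, not_and, Bool.not_eq_false, List.contains_eq_mem, decide_eq_true_eq,
    not_not]

theorem body_eq (nl : String) (recs : List (List (String × String))) :
    (recs.any (fun record =>
        ["name", "scientific_name", "cause_description"].any (fun field =>
          !(PySem.Set.inter
              (PySem.Set.diff (PySem.Set.ofList (PySem.Str.split₀ (PySem.Str.lower nl))) pvStop)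
              (PySem.Set.diff (PySem.Set.ofList (pvTokens record field)) pvStop)).isEmpty)))
      = ((PySem.Str.split₀ (PySem.Str.lower nl)).filter
            (fun w => !altStopWords.contains w)).any
          (fun w => (altFieldWords recs).contains w) := by
  rw [Bool.eq_iff_iff]
  simp only [List.any_eq_true, List.isEmpty_eq_false_iff_exists_mem,
    PySem.Set.mem_inter, PySem.Set.mem_diff, PySem.Set.mem_ofList, mem_pvStop_iff,
    List.mem_filter, altFieldWords, List.contains_eq_mem, List.mem_flatMap, pvTokens,
    Bool.not_eq_eq_eq_not, Bool.not_true, decide_eq_true_eq]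
  constructor
  · rintro ⟨r, hr, f, hf, x, ⟨hxl, hxs⟩, hxf, -⟩
    exact ⟨x, ⟨hxl, by simpa using hxs⟩, r, hr, f, hf, hxf⟩
  · rintro ⟨x, ⟨hxl, hxs⟩, r, hr, f, hf, hxf⟩
    have hm : x ∉ altStopWords := by simpa using hxs
    exact ⟨r, hr, f, hf, x, ⟨hxl, hm⟩, hxf, hm⟩

theorem label_matches_dataset_eq_alt (nl : String) (recs : List (List (String × String))) :
    label_matches_dataset nl recs = label_matches_dataset_alt nl recs := by
  unfold label_matches_dataset label_matches_dataset_alt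
  cases recs with
  | nil => simp
  | cons r rs =>
    simp only [List.isEmpty_cons, if_neg Bool.false_ne_true]
    rw [guard_eq]
    cases hw : (PySem.Str.split₀ (PySem.Str.lower nl)).filter (fun w => !altStopWords.contains w) with
    | nil => simp
    | cons w ws =>
      simp only [List.isEmpty_cons, if_neg Bool.false_ne_true]
      rw [body_eq, hw]

-- ===== VERDICT =====
theorem label_matches_dataset_spec : Claim_equal_label_matches_dataset := by
  intro nl recs _
  exact label_matches_dataset_eq_alt nl recs
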